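-- pv_equiv track=rewrite | github.com/Mohamednajdawi/quiz_hub | quiz_backend/backend/utils/utils.py | _distribute_question_targets
-- ===== SOURCE A (Python) =====
-- import math
-- from typing import Any, Dict, List, Optional, Tuple
--
-- def _distribute_question_targets(chunk_count: int, total_questions: Optional[int]) -> List[int]:
--     if not total_questions or total_questions <= 0 or chunk_count <= 0:
--         return [0] * max(chunk_count, 1)
--
--     remaining = total_questions
--     remaining_chunks = chunk_count
--     targets: List[int] = []
--
--     for _ in range(chunk_count):
--         chunk_target = max(1, math.ceil(remaining / remaining_chunks))
--         targets.append(chunk_target)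
--         remaining -= chunk_target
--         remaining_chunks -= 1
--         if remaining <= 0:
--             break
--
--     # If we exited early because remaining <= 0, pad the rest with zeros
--     while len(targets) < chunk_count:
--         targets.append(0)
--
--     return targets
-- ===== SOURCE B (Python) =====
-- from typing import List, Optional
--
--
-- def _distribute_question_targets(chunk_count: int, total_questions: Optional[int]) -> List[int]:
--     if not total_questions or total_questions <= 0 or chunk_count <= 0:
--         return [0] * max(chunk_count, 1)
--     base, rem = divmod(total_questions, chunk_count)
--     return [base + 1] * rem + [base] * (chunk_count - rem)
-- ===== Notes on version B (the rewrite author's own statement) =====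
-- stated objective: simpler
-- what changed: Replaces A's greedy per-chunk ceil-division loop (with early break and zero-padding while-loop) by a single divmod and the closed-form list [base+1]*rem + [base]*(chunk_count-rem).
import Mathlib
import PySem

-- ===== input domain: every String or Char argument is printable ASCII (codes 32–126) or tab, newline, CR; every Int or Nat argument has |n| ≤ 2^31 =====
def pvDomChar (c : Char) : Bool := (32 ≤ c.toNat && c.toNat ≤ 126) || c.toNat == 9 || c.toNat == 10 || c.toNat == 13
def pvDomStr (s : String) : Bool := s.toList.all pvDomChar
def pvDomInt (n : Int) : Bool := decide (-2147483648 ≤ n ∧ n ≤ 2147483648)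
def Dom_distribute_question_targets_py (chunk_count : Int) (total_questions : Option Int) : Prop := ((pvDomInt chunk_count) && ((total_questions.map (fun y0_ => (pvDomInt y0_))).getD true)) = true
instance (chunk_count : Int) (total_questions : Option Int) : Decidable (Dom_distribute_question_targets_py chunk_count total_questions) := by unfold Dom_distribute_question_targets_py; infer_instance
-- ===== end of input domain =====

-- B replaces A's greedy ceil-division loop by the closed-form split
-- [base+1]*rem ++ [base]*(chunk_count-rem) from one divmod (objective: simpler).

-- ===== PORT A =====
-- math.ceil(remaining / remaining_chunks) is ported as ceiling division
-- -((-remaining) // remaining_chunks); exact on the domain (|ints| ≤ 2^31 < 2^53,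
-- where Python's correctly-rounded float division cannot cross an integer).
def loopA : Nat → Int → Int → List Int → List Int
  | 0, _, _, targets => targets
  | fuel+1, remaining, remaining_chunks, targets =>
    let chunk_target := max 1 (-(PySem.Int.floordiv (-remaining) remaining_chunks))
    let targets' := targets ++ [chunk_target]
    let remaining' := remaining - chunk_target
    let remaining_chunks' := remaining_chunks - 1
    if remaining' ≤ 0 then targets'
    else loopA fuel remaining' remaining_chunks' targets'

-- the trailing `while len(targets) < chunk_count: targets.append(0)` loop
def padA (chunk_count : Int) (targets : List Int) : List Int :=
  if (targets.length : Int) < chunk_count then padA chunk_count (targets ++ [0]) else targets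
termination_by (chunk_count - targets.length).toNat
decreasing_by simp; omega

def distribute_question_targets_py (chunk_count : Int) (total_questions : Option Int) : List Int :=
  match total_questions with
  | none => List.replicate (max chunk_count 1).toNat 0
  | some tq =>
    if tq = 0 ∨ tq ≤ 0 ∨ chunk_count ≤ 0 then List.replicate (max chunk_count 1).toNat 0
    else padA chunk_count (loopA chunk_count.toNat tq chunk_count [])

-- ===== PORT B =====
def distribute_question_targets_py_alt (chunk_count : Int) (total_questions : Option Int) : List Int :=
  match total_questions with
  | none => List.replicate (max chunk_count 1).toNat 0
  | some tq =>
    if tq = 0 ∨ tq ≤ 0 ∨ chunk_count ≤ 0 then List.replicate (max chunk_count 1).toNat 0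
    else
      let base := PySem.Int.floordiv tq chunk_count
      let rem := PySem.Int.mod tq chunk_count
      List.replicate rem.toNat (base + 1) ++ List.replicate (chunk_count - rem).toNat base

-- ===== PRECONDITION & SPEC =====
def Spec_distribute_question_targets_py (chunk_count : Int) (total_questions : Option Int) (out : List Int) : Prop := out = distribute_question_targets_py_alt chunk_count total_questions
instance (chunk_count : Int) (total_questions : Option Int) (out : List Int) : Decidable (Spec_distribute_question_targets_py chunk_count total_questions out) := by unfold Spec_distribute_question_targets_py; infer_instance

-- ===== CLAIM (what is proved, stated in full; the proofs are below) =====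
def Claim_equal_distribute_question_targets_py : Prop := ∀ (chunk_count : Int) (total_questions : Option Int), Dom_distribute_question_targets_py chunk_count total_questions → Spec_distribute_question_targets_py chunk_count total_questions (distribute_question_targets_py chunk_count total_questions)

-- ===== LEMMAS AND PROOFS =====

theorem padA_eq (c : Int) (L : List Int) :
    padA c L = L ++ List.replicate (c - L.length).toNat 0 := by
  fun_induction padA c L with
  | case1 L h ih =>
    rw [ih]
    have : (c - (L.length : Int)).toNat = (c - ((L ++ [0]).length : Int)).toNat + 1 := by
      simp; omega
    rw [this, List.replicate_succ, List.append_assoc]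
    rfl
  | case2 L h =>
    have : (c - (L.length : Int)).toNat = 0 := by omega
    simp [this]

theorem loopA_acc (n : Nat) (r c : Int) (acc : List Int) :
    loopA n r c acc = acc ++ loopA n r c [] := by
  induction n generalizing r c acc with
  | zero => simp [loopA]
  | succ m ih =>
    simp only [loopA]
    split
    · simp
    · rw [ih _ _ (acc ++ _), ih _ _ ([] ++ _)]
      simp

theorem key (k : Nat) (r : Int) (hr : 0 < r) (hk : 0 < (k : Int)) :
    loopA k r (k : Int) [] ++ List.replicate ((k : Int) - (loopA k r (k : Int) []).length).toNat 0
      = List.replicate (PySem.Int.mod r k).toNat (PySem.Int.floordiv r k + 1)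
        ++ List.replicate ((k : Int) - PySem.Int.mod r k).toNat (PySem.Int.floordiv r k) := by
  induction k generalizing r with
  | zero => simp at hk
  | succ j ihj =>
    have hc1 : ((j+1 : Nat) : Int) = (j : Int) + 1 := by push_cast; ring
    rw [hc1] at *
    set c : Int := (j : Int) + 1 with hc
    set q : Int := PySem.Int.floordiv r c with hqdef
    set s : Int := PySem.Int.mod r c with hsdef
    have hcpos : 0 < c := hk
    have hqs : q * c + s = r := PySem.Int.floordiv_mul_add_mod r c
    have hs0 : 0 ≤ s := PySem.Int.mod_nonneg r hcpos
    have hsc : s < c := PySem.Int.mod_lt r hcpos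
    have hjn : (0 : Int) ≤ (j : Int) := Int.natCast_nonneg j
    have hq0 : 0 ≤ q := by nlinarith
    by_cases hs : s = 0
    · -- even split: first chunk gets q (q ≥ 1), remaining becomes q * j
      have hq1 : 1 ≤ q := by nlinarith
      have hceil : -(PySem.Int.floordiv (-r) c) = q := by
        rw [PySem.Int.neg_floordiv_neg_eq_iff_of_pos hcpos]
        constructor <;> nlinarith
      have ht : max 1 (-(PySem.Int.floordiv (-r) c)) = q := by rw [hceil]; omega
      have hr' : r - q = q * (j : Int) := by linear_combination -hqs + hs + q * hc
      simp only [loopA, ht]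
      by_cases hstop : r - q ≤ 0
      · -- only possible when j = 0: the single chunk takes everything
        have hj0 : (j : Int) = 0 := by
          nlinarith [mul_nonneg (show (0:Int) ≤ q - 1 by linarith) hjn]
        simp only [if_pos hstop]
        rw [hs, hc, hj0]
        norm_num
      · have hjpos : 0 < (j : Int) := by
          by_contra h
          apply hstop
          have hj0 : (j : Int) = 0 := by omega
          rw [hr', hj0, mul_zero]
        have hrpos' : 0 < r - q := by omega
        have hq' : PySem.Int.floordiv (r - q) (j : Int) = q := by
          rw [PySem.Int.floordiv_eq_iff_of_pos hjpos]
          constructor <;> nlinarith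
        have hs' : PySem.Int.mod (r - q) (j : Int) = 0 := by
          have h2 := PySem.Int.floordiv_mul_add_mod (r - q) (j : Int)
          rw [hq'] at h2
          linarith
        have key' := ihj (r - q) hrpos' hjpos
        rw [hq', hs'] at key'
        simp only [Int.toNat_zero, List.replicate_zero, List.nil_append, Int.sub_zero] at key'
        rw [if_neg hstop, show c - 1 = (j : Int) by omega, loopA_acc]
        set X : List Int := loopA j (r - q) (j : Int) [] with hX
        simp only [List.nil_append, List.cons_append, List.length_cons]
        have hL : (c - ((X.length + 1 : Nat) : Int)).toNat
            = ((j : Int) - (X.length : Int)).toNat := by push_cast; omega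
        rw [hL, key', hs]
        have hcn : (c - 0).toNat = ((j : Int)).toNat + 1 := by omega
        rw [hcn, List.replicate_succ]
        simp
    · -- s > 0: first chunk gets q + 1, remaining becomes q * j + (s - 1)
      have hspos : 0 < s := by omega
      have hceil : -(PySem.Int.floordiv (-r) c) = q + 1 := by
        rw [PySem.Int.neg_floordiv_neg_eq_iff_of_pos hcpos]
        constructor <;> nlinarith
      have ht : max 1 (-(PySem.Int.floordiv (-r) c)) = q + 1 := by rw [hceil]; omega
      have hr' : r - (q + 1) = q * (j : Int) + (s - 1) := by linear_combination -hqs + q * hc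
      simp only [loopA, ht]
      by_cases hstop : r - (q + 1) ≤ 0
      · -- then q = 0 and s = 1: one chunk of 1, zeros afterwards
        have h2 : s = 1 := le_antisymm (by nlinarith [mul_nonneg hq0 hjn]) (by omega)
        have h1 : q * (j : Int) = 0 := le_antisymm (by nlinarith) (mul_nonneg hq0 hjn)
        have hq00 : q = 0 := by
          by_contra h
          have hj0 : (j : Int) = 0 := by
            rcases mul_eq_zero.mp h1 with h' | h'
            · exact absurd h' h
            · exact h'
          omega
        simp only [if_pos hstop]
        rw [hq00, h2]
        simp only [List.nil_append, List.cons_append, List.length_cons, List.length_nil]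
        norm_num
      · have hjpos : 0 < (j : Int) := by
          have : s < (j : Int) + 1 := by rw [← hc]; exact hsc
          omega
        have hrpos' : 0 < r - (q + 1) := by omega
        have hq' : PySem.Int.floordiv (r - (q + 1)) (j : Int) = q := by
          rw [PySem.Int.floordiv_eq_iff_of_pos hjpos]
          have hs1j : s - 1 < (j : Int) := by omega
          constructor <;> nlinarith
        have hs' : PySem.Int.mod (r - (q + 1)) (j : Int) = s - 1 := by
          have h2 := PySem.Int.floordiv_mul_add_mod (r - (q + 1)) (j : Int)
          rw [hq'] at h2
          linarith
        have key' := ihj (r - (q + 1)) hrpos' hjpos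
        rw [hq', hs'] at key'
        rw [if_neg hstop, show c - 1 = (j : Int) by omega, loopA_acc]
        set X : List Int := loopA j (r - (q + 1)) (j : Int) [] with hX
        simp only [List.nil_append, List.cons_append, List.length_cons]
        have hL : (c - ((X.length + 1 : Nat) : Int)).toNat
            = ((j : Int) - (X.length : Int)).toNat := by push_cast; omega
        rw [hL, key']
        have hsn : s.toNat = (s - 1).toNat + 1 := by omega
        have hcs : ((j : Int) - (s - 1)).toNat = (c - s).toNat := by omega
        rw [hsn, List.replicate_succ, hcs]
        simp

-- ===== VERDICT (by name: the statement is the Claim_ definition above) =====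
theorem distribute_question_targets_py_spec : Claim_equal_distribute_question_targets_py := by
  intro chunk_count total_questions _
  unfold Spec_distribute_question_targets_py distribute_question_targets_py distribute_question_targets_py_alt
  cases total_questions with
  | none => rfl
  | some tq =>
    by_cases h : tq = 0 ∨ tq ≤ 0 ∨ chunk_count ≤ 0
    · simp [h]
    · push Not at h
      obtain ⟨_, htq', hc'⟩ := h
      have hcast : ((chunk_count.toNat : Int)) = chunk_count := Int.toNat_of_nonneg (le_of_lt hc')
      simp only [if_neg (show ¬ (tq = 0 ∨ tq ≤ 0 ∨ chunk_count ≤ 0) by omega)]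
      rw [padA_eq]
      have := key chunk_count.toNat tq htq' (by rw [hcast]; exact hc')
      rw [hcast] at this
      exact this
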